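-- pv_equiv track=rewrite | github.com/drkpkg/codigo_control | impuestos_internos.py | tratar_dosificacion
-- ===== SOURCE A (Python) =====
-- def tratar_dosificacion(llave_dosificacion, cifra_verhoeff):
--     """Retorna un array por medio de la llave de dosificacion y el valor verhoeff """
--     cifra = []
--     inicio = 0
--     for position in cifra_verhoeff:
--         final = inicio + position
--         cifra.append(llave_dosificacion[inicio:final])
--         inicio = final
--     return cifra
-- ===== SOURCE B (Python) =====
-- def tratar_dosificacion(llave_dosificacion, cifra_verhoeff):
--     """Retorna un array por medio de la llave de dosificacion y el valor verhoeff """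
--     bounds = [0]
--     for position in cifra_verhoeff:
--         bounds.append(bounds[-1] + position)
--     return [llave_dosificacion[i:j] for i, j in zip(bounds, bounds[1:])]
-- ===== Notes on version B (the rewrite author's own statement) =====
-- stated objective: alternative
-- what changed: Replaces the running mutable offset inside the chunking loop by a precomputed prefix-sum boundary list, then builds the chunks by slicing between consecutive boundary pairs (zip of bounds with its tail).
import Mathlib
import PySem

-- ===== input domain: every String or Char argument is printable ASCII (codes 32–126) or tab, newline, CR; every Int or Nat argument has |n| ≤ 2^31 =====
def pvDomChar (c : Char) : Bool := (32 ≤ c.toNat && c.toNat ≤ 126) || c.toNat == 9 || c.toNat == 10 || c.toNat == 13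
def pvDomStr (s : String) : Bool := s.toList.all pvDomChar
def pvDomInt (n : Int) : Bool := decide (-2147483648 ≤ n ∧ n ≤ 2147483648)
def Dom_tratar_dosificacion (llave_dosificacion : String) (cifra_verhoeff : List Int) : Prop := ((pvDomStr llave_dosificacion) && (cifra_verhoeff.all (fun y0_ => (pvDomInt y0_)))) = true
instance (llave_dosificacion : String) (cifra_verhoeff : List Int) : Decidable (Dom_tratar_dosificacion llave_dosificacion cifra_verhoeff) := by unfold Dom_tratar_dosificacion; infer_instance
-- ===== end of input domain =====

-- B replaces A's running-offset accumulator loop by a precomputed prefix-sum boundary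
-- table paired with its own tail (objective: alternative decomposition; same cost).
-- ===== PORT A =====
-- for position in cifra_verhoeff: final = inicio + position; cifra.append(llave[inicio:final]); inicio = final
def tratar_dosificacion (llave_dosificacion : String) (cifra_verhoeff : List Int) : List String :=
  (cifra_verhoeff.foldl
    (fun st position =>
      let final := st.2 + position
      (st.1 ++ [PySem.Str.slice llave_dosificacion (some st.2) (some final)], final))
    (([] : List String), (0 : Int))).1

-- ===== PORT B =====
-- bounds = [0]; for p in cs: bounds.append(bounds[-1] + p)   (prefix sums, built structurally)
def pvBoundsB (acc : Int) : List Int → List Int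
  | [] => [acc]
  | p :: ps => acc :: pvBoundsB (acc + p) ps

-- [llave[i:j] for i, j in zip(bounds, bounds[1:])]
def tratar_dosificacion_alt (llave_dosificacion : String) (cifra_verhoeff : List Int) : List String :=
  let bounds := pvBoundsB 0 cifra_verhoeff
  (bounds.zip bounds.tail).map
    (fun ij => PySem.Str.slice llave_dosificacion (some ij.1) (some ij.2))

-- ===== PRECONDITION & SPEC =====
def Spec_tratar_dosificacion (llave_dosificacion : String) (cifra_verhoeff : List Int) (out : List String) : Prop := out = tratar_dosificacion_alt llave_dosificacion cifra_verhoeff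
instance (llave_dosificacion : String) (cifra_verhoeff : List Int) (out : List String) : Decidable (Spec_tratar_dosificacion llave_dosificacion cifra_verhoeff out) := by unfold Spec_tratar_dosificacion; infer_instance

-- ===== CLAIM (what is proved, stated in full; the proofs are below) =====
def Claim_equal_tratar_dosificacion : Prop := ∀ (llave_dosificacion : String) (cifra_verhoeff : List Int), Dom_tratar_dosificacion llave_dosificacion cifra_verhoeff → Spec_tratar_dosificacion llave_dosificacion cifra_verhoeff (tratar_dosificacion llave_dosificacion cifra_verhoeff)

-- ===== LEMMAS AND PROOFS =====
theorem pvBoundsB_cons (ps : List Int) (a : Int) :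
    pvBoundsB a ps = a :: (pvBoundsB a ps).tail := by
  cases ps <;> rfl

theorem pv_fold_eq (llave : String) (ps : List Int) :
    ∀ (acc : List String) (inicio : Int),
      (ps.foldl
        (fun st position =>
          let final := st.2 + position
          (st.1 ++ [PySem.Str.slice llave (some st.2) (some final)], final))
        (acc, inicio)).1
      = acc ++ ((pvBoundsB inicio ps).zip (pvBoundsB inicio ps).tail).map
          (fun ij => PySem.Str.slice llave (some ij.1) (some ij.2)) := by
  induction ps with
  | nil => intro acc inicio; simp [pvBoundsB]
  | cons p ps ih =>
    intro acc inicio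
    rw [List.foldl_cons, ih]
    conv_rhs => rw [show pvBoundsB inicio (p :: ps) = inicio :: pvBoundsB (inicio + p) ps from rfl,
                    pvBoundsB_cons ps (inicio + p)]
    simp
    conv_rhs => rw [← pvBoundsB_cons ps (inicio + p)]


-- ===== VERDICT (by name: the statement is the Claim_ definition above) =====
theorem tratar_dosificacion_spec : Claim_equal_tratar_dosificacion := by
  intro llave cs _
  show tratar_dosificacion llave cs = tratar_dosificacion_alt llave cs
  unfold tratar_dosificacion tratar_dosificacion_alt
  exact pv_fold_eq llave cs [] 0
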